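-- pv_equiv track=rewrite | github.com/RahAmudha/CS | queens.py | check_queen
-- ===== SOURCE A (Python) =====
-- def check_queen (data):
--     possible_solutions = []
--     for perm in data:
--         is_queen = True
--         for i in range (len (perm)):
--             for j in range (len (perm)):
--                 if abs (i - j) == abs (perm [i] - perm [j]) and i != j:
--                     is_queen = False
--         if is_queen:
--             possible_solutions.append (perm)
--     return possible_solutions
-- ===== SOURCE B (Python) =====
-- def _has_adjacent_dup(sorted_vals):
--     return any(a == b for a, b in zip(sorted_vals, sorted_vals[1:]))
--
--
-- def check_queen(data):
--     result = []
--     for perm in data: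
--         diffs = sorted(i - perm[i] for i in range(len(perm)))
--         sums = sorted(i + perm[i] for i in range(len(perm)))
--         if not _has_adjacent_dup(diffs) and not _has_adjacent_dup(sums):
--             result.append(perm)
--     return result
-- ===== Notes on version B (the rewrite author's own statement) =====
-- stated objective: faster
-- what changed: Replaces A's nested O(n^2) all-pairs diagonal scan per row list with computing the two diagonal keys i-perm[i] and i+perm[i], sorting each key list and scanning adjacent pairs for duplicates.
import Mathlib
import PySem

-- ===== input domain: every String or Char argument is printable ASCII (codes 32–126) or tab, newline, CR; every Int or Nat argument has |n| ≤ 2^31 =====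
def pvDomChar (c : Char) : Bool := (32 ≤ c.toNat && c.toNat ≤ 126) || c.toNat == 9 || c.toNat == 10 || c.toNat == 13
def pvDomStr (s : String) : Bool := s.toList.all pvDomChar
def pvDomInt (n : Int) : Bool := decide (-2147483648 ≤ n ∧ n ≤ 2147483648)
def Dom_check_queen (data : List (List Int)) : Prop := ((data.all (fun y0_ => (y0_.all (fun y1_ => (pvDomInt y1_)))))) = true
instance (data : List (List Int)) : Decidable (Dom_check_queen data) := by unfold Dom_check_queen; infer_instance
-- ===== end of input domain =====

-- B replaces A's nested O(n^2) pairwise diagonal scan per row list by sorting the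
-- per-index diagonal keys (i - perm[i] and i + perm[i]) and scanning adjacent pairs
-- for duplicates (objective: different algorithm, O(n log n) per row).

-- ===== PORT A =====
def check_queen (data : List (List Int)) : List (List Int) :=
  data.foldl (fun possible_solutions perm =>
    let is_queen :=
      (PySem.List.pyRange 0 (perm.length : Int) 1).foldl (fun b i =>
        (PySem.List.pyRange 0 (perm.length : Int) 1).foldl (fun b j =>
          if |i - j| == |PySem.List.pyGetD perm i 0 - PySem.List.pyGetD perm j 0| && i != j
          then false else b) b) true
    if is_queen then possible_solutions ++ [perm] else possible_solutions) []

-- ===== PORT B =====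
def pyHasAdjDup (sorted_vals : List Int) : Bool :=
  (sorted_vals.zip (PySem.List.slice sorted_vals (some 1) none)).any (fun p => p.1 == p.2)

def check_queen_alt (data : List (List Int)) : List (List Int) :=
  data.foldl (fun result perm =>
    let diffs := PySem.List.sorted
      ((PySem.List.pyRange 0 (perm.length : Int) 1).map (fun i => i - PySem.List.pyGetD perm i 0))
      (fun x => x) false
    let sums := PySem.List.sorted
      ((PySem.List.pyRange 0 (perm.length : Int) 1).map (fun i => i + PySem.List.pyGetD perm i 0))
      (fun x => x) false
    if !pyHasAdjDup diffs && !pyHasAdjDup sums then result ++ [perm] else result) []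

-- ===== PRECONDITION & SPEC =====
def Spec_check_queen (data : List (List Int)) (out : List (List Int)) : Prop := out = check_queen_alt data
instance (data : List (List Int)) (out : List (List Int)) : Decidable (Spec_check_queen data out) := by unfold Spec_check_queen; infer_instance

-- ===== CLAIM (what is proved, stated in full; the proofs are below) =====
def Claim_equal_check_queen : Prop := ∀ (data : List (List Int)), Dom_check_queen data → Spec_check_queen data (check_queen data)

-- ===== LEMMAS AND PROOFS =====

-- a fold that only ever clears the flag computes "initial && no element satisfies p"
lemma foldl_clear_flag {α : Type} (p : α → Bool) :
    ∀ (l : List α) (b0 : Bool),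
      l.foldl (fun b x => if p x then false else b) b0 = (b0 && !l.any p) := by
  intro l
  induction l with
  | nil => intro b0; simp
  | cons x t ih =>
      intro b0
      rw [List.foldl_cons, List.any_cons]
      cases h : p x
      · rw [if_neg (by simp), ih]; simp
      · rw [if_pos rfl, ih]; simp

lemma foldl_and_flag {α : Type} (q : α → Bool) :
    ∀ (l : List α) (b0 : Bool),
      l.foldl (fun b x => b && q x) b0 = (b0 && l.all q) := by
  intro l
  induction l with
  | nil => intro b0; simp
  | cons x t ih =>
      intro b0
      simp [List.foldl_cons, ih, Bool.and_assoc]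

-- on a ≤-sorted list, "no adjacent duplicates" is exactly Nodup
lemma adjdup_of_pairwise (s : List Int) (hs : s.Pairwise (· ≤ ·)) :
    (pyHasAdjDup s = false ↔ s.Nodup) := by
  induction s with
  | nil => simp [pyHasAdjDup]
  | cons a t ih =>
      have ha : ∀ x ∈ t, a ≤ x := fun x hx => (List.pairwise_cons.mp hs).1 x hx
      have ht : t.Pairwise (· ≤ ·) := (List.pairwise_cons.mp hs).2
      cases t with
      | nil => simp [pyHasAdjDup, PySem.List.slice_from_one]
      | cons b t' =>
          have hb := ih ht
          have hab : a ≤ b := ha b (by simp)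
          have hbt : ∀ x ∈ t', b ≤ x := fun x hx => (List.pairwise_cons.mp ht).1 x hx
          simp only [pyHasAdjDup, PySem.List.slice_from_one] at hb ⊢
          simp only [List.tail_cons, List.zip_cons_cons, List.any_cons, Bool.or_eq_false_iff,
            beq_eq_false_iff_ne, ne_eq, List.nodup_cons] at hb ⊢
          constructor
          · rintro ⟨hne, hrest⟩
            refine ⟨?_, hb.mp hrest⟩
            intro hmem
            rcases List.mem_cons.mp hmem with h | h
            · exact hne h
            · -- a ∈ t' with b ≤ a and a ≤ b forces a = b
              have hba : b ≤ a := hbt a h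
              exact hne (le_antisymm hab hba)
          · rintro ⟨hnm, hnd⟩
            exact ⟨fun h => hnm (by simp [h]), hb.mpr hnd⟩

-- Nodup of [f i for i in range(0, n)] ↔ f is injective on {0 ≤ i < n}
lemma nodup_map_pyRange_iff (f : Int → Int) (n : Int) :
    ((PySem.List.pyRange 0 n 1).map f).Nodup ↔
      (∀ i j : Int, 0 ≤ i → i < n → 0 ≤ j → j < n → i ≠ j → f i ≠ f j) := by
  rw [List.Nodup, List.pairwise_map, List.pairwise_iff_getElem]
  simp only [PySem.List.length_pyRange_one, PySem.List.getElem_pyRange_one, zero_add, ne_eq,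
    sub_zero]
  constructor
  · intro h i j hi0 hin hj0 hjn hij
    rcases lt_trichotomy i j with hlt | heq | hgt
    · have hh := h i.toNat j.toNat (by omega) (by omega) (by omega)
      rwa [Int.toNat_of_nonneg hi0, Int.toNat_of_nonneg hj0] at hh
    · exact absurd heq hij
    · have hh := h j.toNat i.toNat (by omega) (by omega) (by omega)
      rw [Int.toNat_of_nonneg hj0, Int.toNat_of_nonneg hi0] at hh
      exact Ne.symm hh
  · intro h k l hk hl hkl
    exact h k l (by omega) (by omega) (by omega) (by omega) (by omega)

-- the per-row decisions of A and B coincide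
lemma keep_eq (perm : List Int) :
    ((PySem.List.pyRange 0 (perm.length : Int) 1).foldl (fun b i =>
        (PySem.List.pyRange 0 (perm.length : Int) 1).foldl (fun b j =>
          if |i - j| == |PySem.List.pyGetD perm i 0 - PySem.List.pyGetD perm j 0| && i != j
          then false else b) b) true)
    = (!pyHasAdjDup (PySem.List.sorted
          ((PySem.List.pyRange 0 (perm.length : Int) 1).map (fun i => i - PySem.List.pyGetD perm i 0))
          (fun x => x) false)
       && !pyHasAdjDup (PySem.List.sorted
          ((PySem.List.pyRange 0 (perm.length : Int) 1).map (fun i => i + PySem.List.pyGetD perm i 0))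
          (fun x => x) false)) := by
  rw [Bool.eq_iff_iff]
  simp only [foldl_clear_flag, foldl_and_flag, Bool.true_and]
  rw [Bool.and_eq_true, Bool.not_eq_true', Bool.not_eq_true',
    adjdup_of_pairwise _ (PySem.List.sorted_pairwise _ _),
    adjdup_of_pairwise _ (PySem.List.sorted_pairwise _ _),
    List.Perm.nodup_iff (PySem.List.sorted_perm _ _ _),
    List.Perm.nodup_iff (PySem.List.sorted_perm _ _ _),
    nodup_map_pyRange_iff, nodup_map_pyRange_iff]
  simp only [List.all_eq_true, Bool.not_eq_true', List.any_eq_false, Bool.and_eq_true,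
    beq_iff_eq, bne_iff_ne, PySem.List.mem_pyRange_one, Int.abs_eq_natAbs, ne_eq]
  constructor
  · intro h
    constructor
    · intro i j hi0 hin hj0 hjn hij heq
      have hh := h i ⟨hi0, hin⟩ j ⟨hj0, hjn⟩
      set a := PySem.List.pyGetD perm i 0
      set b := PySem.List.pyGetD perm j 0
      omega
    · intro i j hi0 hin hj0 hjn hij heq
      have hh := h i ⟨hi0, hin⟩ j ⟨hj0, hjn⟩
      set a := PySem.List.pyGetD perm i 0
      set b := PySem.List.pyGetD perm j 0
      omega
  · rintro ⟨hd, hs⟩ i hi j hj hcon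
    have h1 := fun hne => hd i j hi.1 hi.2 hj.1 hj.2 hne
    have h2 := fun hne => hs i j hi.1 hi.2 hj.1 hj.2 hne
    set a := PySem.List.pyGetD perm i 0
    set b := PySem.List.pyGetD perm j 0
    by_cases hij : i = j
    · exact (by omega : False)
    · exact (h1 hij (by omega))

lemma fold_eq :
    ∀ (data : List (List Int)) (acc : List (List Int)),
      data.foldl (fun possible_solutions perm =>
        let is_queen :=
          (PySem.List.pyRange 0 (perm.length : Int) 1).foldl (fun b i =>
            (PySem.List.pyRange 0 (perm.length : Int) 1).foldl (fun b j =>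
              if |i - j| == |PySem.List.pyGetD perm i 0 - PySem.List.pyGetD perm j 0| && i != j
              then false else b) b) true
        if is_queen then possible_solutions ++ [perm] else possible_solutions) acc
      = data.foldl (fun result perm =>
        let diffs := PySem.List.sorted
          ((PySem.List.pyRange 0 (perm.length : Int) 1).map (fun i => i - PySem.List.pyGetD perm i 0))
          (fun x => x) false
        let sums := PySem.List.sorted
          ((PySem.List.pyRange 0 (perm.length : Int) 1).map (fun i => i + PySem.List.pyGetD perm i 0))
          (fun x => x) false
        if !pyHasAdjDup diffs && !pyHasAdjDup sums then result ++ [perm] else result) acc := by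
  intro data
  induction data with
  | nil => intro acc; rfl
  | cons perm rest ih =>
      intro acc
      simp only [List.foldl_cons, keep_eq perm]
      exact ih _

-- ===== VERDICT (by name: the statement is the Claim_ definition above) =====
theorem check_queen_spec : Claim_equal_check_queen := by
  intro data _
  unfold Spec_check_queen check_queen check_queen_alt
  exact fold_eq data []
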